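-- pv_equiv track=rewrite | github.com/GDeLaurentis/lips | lips/invariants.py | Brackets3NeedsToBeRemoved
-- ===== SOURCE A (Python) =====
-- def Brackets3NeedsToBeRemoved(n, a, bc, d):
--     near = [a, a + 1, a - 1]
--     if a == n:
--         near += [1]
--     if a == 1:
--         near += [n]
--     for i in range(len(bc[0]) + 1):
--         if d in near:
--             near += [d, d + 1, d - 1]
--             if d == n:
--                 near += [1]
--             if d == 1:
--                 near += [n]
--         for j in range(len(bc[0])):
--             if bc[0][j] in near:
--                 near += [bc[0][j], bc[0][j] + 1, bc[0][j] - 1]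
--                 if bc[0][j] == n:
--                     near += [1]
--                 if bc[0][j] == 1:
--                     near += [n]
--     if (d not in near or
--        True in [bc[0][i] not in near for i in range(len(bc[0]))]):
--         return True
--     return False
-- ===== SOURCE B (Python) =====
-- def Brackets3NeedsToBeRemoved(n, a, bc, d):
--     def nb(x):
--         s = {x, x + 1, x - 1}
--         if x == n:
--             s.add(1)
--         if x == 1:
--             s.add(n)
--         return s
--     S = nb(a)
--     pending = set(bc[0]) | {d}
--     changed = True
--     while changed:
--         newly = {x for x in pending if x in S}
--         changed = bool(newly)
--         pending -= newly
--         for x in newly: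
--             S |= nb(x)
--     return not (d in S and all(x in S for x in bc[0]))
-- ===== Notes on version B (the rewrite author's own statement) =====
-- stated objective: faster
-- what changed: A runs len(bc[0])+1 full passes that re-scan bc[0] and do membership tests on an ever-growing duplicate-laden list; B computes the same reachability closure with a set-based worklist saturation (each of d and the bc[0] items is absorbed at most once, neighbourhoods added to a hash set), then does one membership check per item.
import Mathlib
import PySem

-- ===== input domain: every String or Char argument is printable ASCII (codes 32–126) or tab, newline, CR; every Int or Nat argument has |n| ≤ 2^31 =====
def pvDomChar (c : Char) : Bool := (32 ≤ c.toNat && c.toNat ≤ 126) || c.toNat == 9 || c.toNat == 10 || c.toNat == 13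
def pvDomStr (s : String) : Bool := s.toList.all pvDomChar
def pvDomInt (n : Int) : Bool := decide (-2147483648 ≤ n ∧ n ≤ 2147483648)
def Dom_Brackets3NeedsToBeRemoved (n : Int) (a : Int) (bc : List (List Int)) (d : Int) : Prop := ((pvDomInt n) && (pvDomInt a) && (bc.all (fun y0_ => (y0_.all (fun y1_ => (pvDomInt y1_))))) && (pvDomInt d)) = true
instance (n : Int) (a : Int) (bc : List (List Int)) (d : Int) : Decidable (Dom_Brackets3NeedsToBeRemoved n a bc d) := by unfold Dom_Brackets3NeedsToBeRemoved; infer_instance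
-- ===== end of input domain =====

-- B replaces A's fixed (m+1) full-list-scanning passes over a duplicate-laden list by a set-based
-- worklist saturation in which each pending item is absorbed at most once (objective: faster).

-- ===== PORT A =====
-- A-side helper: Python's repeated block "if x in near: near += [x, x+1, x-1]; if x == n: near += [1]; if x == 1: near += [n]"
def pvAbsorb (n : Int) (near : List Int) (x : Int) : List Int :=
  if x ∈ near then
    let near := near ++ [x, x + 1, x - 1]
    let near := if x = n then near ++ [1] else near
    if x = 1 then near ++ [n] else near
  else near

def Brackets3NeedsToBeRemoved (n : Int) (a : Int) (bc : List (List Int)) (d : Int) : Bool :=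
  let bc0 := bc.headD []       -- bc[0]; Pre_ excludes bc = [] (Python IndexError)
  let near := [a, a + 1, a - 1]
  let near := if a = n then near ++ [1] else near
  let near := if a = 1 then near ++ [n] else near
  -- for i in range(len(bc[0]) + 1): process d, then each bc[0][j] in order (indices j are in range)
  let near := (List.range (bc0.length + 1)).foldl
    (fun near _ => bc0.foldl (pvAbsorb n) (pvAbsorb n near d)) near
  if d ∉ near ∨ true ∈ bc0.map (fun x => decide (x ∉ near)) then true else false

-- ===== PORT B =====
-- B-side helper: nb(x) as a set
def pvNb (n x : Int) : PySem.Set Int :=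
  let s := PySem.Set.ofList [x, x + 1, x - 1]
  let s := if x = n then PySem.Set.add s 1 else s
  if x = 1 then PySem.Set.add s n else s

-- B-side helper: the "while changed" worklist loop of Source B
def pvBfs (n : Int) (S pending : PySem.Set Int) : PySem.Set Int :=
  let newly := pending.filter (fun x => PySem.Set.contains S x)
  if h : newly.isEmpty then S
  else pvBfs n (newly.foldl (fun T x => PySem.Set.union T (pvNb n x)) S)
              (PySem.Set.diff pending newly)
termination_by pending.length
decreasing_by
  have hnewly : newly = List.filter (fun x => PySem.Set.contains S x) pending := by
    simp [newly, List.unattach_filter]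
  rw [hnewly] at h
  have hne : ∃ x ∈ pending, PySem.Set.contains S x := by
    by_contra hc
    push Not at hc
    refine h ?_
    simp only [List.isEmpty_iff, List.filter_eq_nil_iff]
    exact fun x hx => by simpa using hc x hx
  obtain ⟨x, hxp, hxS⟩ := hne
  simp only [PySem.Set.diff, hnewly]
  apply List.length_filter_lt_length_iff_exists.mpr
  refine ⟨x, hxp, ?_⟩
  simp [List.mem_filter, hxp]
  exact (PySem.Set.contains_iff S x).mp hxS

def Brackets3NeedsToBeRemoved_alt (n : Int) (a : Int) (bc : List (List Int)) (d : Int) : Bool :=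
  let bc0 := bc.headD []       -- bc[0]; Pre_ excludes bc = [] (Python IndexError)
  let S := pvNb n a
  let pending := PySem.Set.union (PySem.Set.ofList bc0) (PySem.Set.ofList [d])
  let S := pvBfs n S pending
  !(PySem.Set.contains S d && bc0.all (fun x => PySem.Set.contains S x))

-- ===== PRECONDITION & SPEC =====
-- Pre_ excludes only bc = [], on which Python A (and Python B alike) raises IndexError at bc[0].
def Pre_Brackets3NeedsToBeRemoved (n : Int) (a : Int) (bc : List (List Int)) (d : Int) : Prop := bc ≠ []
instance (n : Int) (a : Int) (bc : List (List Int)) (d : Int) : Decidable (Pre_Brackets3NeedsToBeRemoved n a bc d) := by unfold Pre_Brackets3NeedsToBeRemoved; infer_instance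

def pvWitness_Brackets3NeedsToBeRemoved : Int × Int × List (List Int) × Int := (5, 1, [[2, 3]], 4)

def Spec_Brackets3NeedsToBeRemoved (n : Int) (a : Int) (bc : List (List Int)) (d : Int) (out : Bool) : Prop := out = Brackets3NeedsToBeRemoved_alt n a bc d
instance (n : Int) (a : Int) (bc : List (List Int)) (d : Int) (out : Bool) : Decidable (Spec_Brackets3NeedsToBeRemoved n a bc d out) := by unfold Spec_Brackets3NeedsToBeRemoved; infer_instance

-- ===== CLAIM (what is proved, stated in full; the proofs are below) =====
def Claim_equal_Brackets3NeedsToBeRemoved : Prop := ∀ (n : Int) (a : Int) (bc : List (List Int)) (d : Int), Dom_Brackets3NeedsToBeRemoved n a bc d → Pre_Brackets3NeedsToBeRemoved n a bc d → Spec_Brackets3NeedsToBeRemoved n a bc d (Brackets3NeedsToBeRemoved n a bc d)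

-- ===== LEMMAS AND PROOFS =====

-- the neighbourhood x contributes, as one flat list
def NbL (n x : Int) : List Int := ([x, x + 1, x - 1] ++ (if x = n then [1] else [])) ++ (if x = 1 then [n] else [])

-- the closure both programs test membership in: everything in S0, plus NbL of every reachable item
inductive Cl (n : Int) (S0 items : List Int) : Int → Prop
  | base {y : Int} : y ∈ S0 → Cl n S0 items y
  | step {x y : Int} : x ∈ items → Cl n S0 items x → y ∈ NbL n x → Cl n S0 items y

def ClosedL (n : Int) (items T : List Int) : Prop := ∀ x ∈ items, x ∈ T → ∀ y ∈ NbL n x, y ∈ T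

theorem cl_subset (n : Int) (S0 items T : List Int) (hT : ClosedL n items T)
    (hb : ∀ z ∈ S0, z ∈ T) : ∀ z, Cl n S0 items z → z ∈ T := by
  intro z hz
  induction hz with
  | base h => exact hb _ h
  | step hx _ hy ih => exact hT _ hx ih _ hy

theorem absorb_eq (n : Int) (near : List Int) (x : Int) :
    pvAbsorb n near x = if x ∈ near then near ++ NbL n x else near := by
  unfold pvAbsorb NbL
  split_ifs <;> simp_all [List.append_assoc]

theorem mem_pvNb (n x y : Int) : y ∈ pvNb n x ↔ y ∈ NbL n x := by
  by_cases hn : x = n <;> by_cases h1 : x = 1 <;>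
    simp [pvNb, NbL, hn, h1, PySem.Set.mem_add, PySem.Set.mem_ofList] <;> tauto

theorem absorb_mono (n : Int) (near : List Int) (x y : Int) (h : y ∈ near) :
    y ∈ pvAbsorb n near x := by
  rw [absorb_eq]; split
  · exact List.mem_append_left _ h
  · exact h

theorem foldl_absorb_mono (n : Int) (l : List Int) :
    ∀ (near : List Int) (y : Int), y ∈ near → y ∈ l.foldl (pvAbsorb n) near := by
  induction l with
  | nil => exact fun _ _ h => h
  | cons x t ih => exact fun near y h => ih _ _ (absorb_mono n near x y h)

theorem foldl_absorb_sound (n : Int) (S0 items : List Int) (l : List Int)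
    (hl : ∀ x ∈ l, x ∈ items) :
    ∀ near, (∀ z ∈ near, Cl n S0 items z) → ∀ z ∈ l.foldl (pvAbsorb n) near, Cl n S0 items z := by
  induction l with
  | nil => exact fun _ h => h
  | cons x t ih =>
    intro near h z hz
    refine ih (fun u hu => hl u (List.mem_cons_of_mem _ hu)) (pvAbsorb n near x) ?_ z hz
    intro u hu
    rw [absorb_eq] at hu
    split at hu
    · rcases List.mem_append.mp hu with h1 | h2
      · exact h u h1
      · exact Cl.step (hl x List.mem_cons_self) (h x (by assumption)) h2
    · exact h u hu

theorem foldl_absorb_fires (n : Int) (l : List Int) :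
    ∀ (near : List Int) (x : Int), x ∈ l → x ∈ near → ∀ y ∈ NbL n x, y ∈ l.foldl (pvAbsorb n) near := by
  induction l with
  | nil => intro _ x hx; cases hx
  | cons hd t ih =>
    intro near x hx hxn y hy
    rcases List.mem_cons.mp hx with rfl | hxt
    · have hmem : y ∈ pvAbsorb n near x := by
        rw [absorb_eq, if_pos hxn]
        exact List.mem_append_right _ hy
      exact foldl_absorb_mono n t _ y hmem
    · exact ih (pvAbsorb n near hd) x hxt (absorb_mono n near hd x hxn) y hy

theorem foldl_absorb_stable (n : Int) (items T : List Int) (hT : ClosedL n items T) (l : List Int)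
    (hl : ∀ x ∈ l, x ∈ items) :
    ∀ near, (∀ y, y ∈ near ↔ y ∈ T) → ∀ y, y ∈ l.foldl (pvAbsorb n) near ↔ y ∈ T := by
  induction l with
  | nil => exact fun _ h => h
  | cons x t ih =>
    intro near h y
    refine ih (fun u hu => hl u (List.mem_cons_of_mem _ hu)) (pvAbsorb n near x) ?_ y
    intro u
    rw [absorb_eq]
    split
    · constructor
      · intro hu
        rcases List.mem_append.mp hu with h1 | h2
        · exact (h u).mp h1
        · exact hT x (hl x List.mem_cons_self) ((h x).mp (by assumption)) u h2
      · intro hu; exact List.mem_append_left _ ((h u).mpr hu)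
    · exact h u

-- A's outer loop as an iterator of whole passes
def passIter (n : Int) (items : List Int) : Nat → List Int → List Int
  | 0, near => near
  | k + 1, near => passIter n items k (items.foldl (pvAbsorb n) near)

theorem passIter_mono (n : Int) (items : List Int) (k : Nat) :
    ∀ near y, y ∈ near → y ∈ passIter n items k near := by
  induction k with
  | zero => exact fun _ _ h => h
  | succ k ih => exact fun near y h => ih _ y (foldl_absorb_mono n items near y h)

theorem passIter_sound (n : Int) (S0 items : List Int) (k : Nat) :
    ∀ near, (∀ z ∈ near, Cl n S0 items z) → ∀ z ∈ passIter n items k near, Cl n S0 items z := by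
  induction k with
  | zero => exact fun _ h => h
  | succ k ih =>
    exact fun near h => ih _ (foldl_absorb_sound n S0 items items (fun x hx => hx) near h)

theorem passIter_stable (n : Int) (items T : List Int) (hT : ClosedL n items T) (k : Nat) :
    ∀ near, (∀ y, y ∈ near ↔ y ∈ T) → ∀ y, y ∈ passIter n items k near ↔ y ∈ T := by
  induction k with
  | zero => exact fun _ h => h
  | succ k ih =>
    exact fun near h => ih _ (foldl_absorb_stable n items T hT items (fun x hx => hx) near h)

theorem passIter_pass_comm (n : Int) (items : List Int) (k : Nat) :
    ∀ near, items.foldl (pvAbsorb n) (passIter n items k near)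
      = passIter n items k (items.foldl (pvAbsorb n) near) := by
  induction k with
  | zero => exact fun _ => rfl
  | succ k ih => exact fun near => ih (items.foldl (pvAbsorb n) near)

theorem range_foldl_passIter (n d : Int) (bc0 : List Int) (k : Nat) :
    ∀ (near : List Int),
      (List.range k).foldl (fun near _ => bc0.foldl (pvAbsorb n) (pvAbsorb n near d)) near
        = passIter n (d :: bc0) k near := by
  induction k with
  | zero => exact fun _ => rfl
  | succ k ih =>
    intro near
    rw [List.range_succ, List.foldl_append, ih near]
    show (d :: bc0).foldl (pvAbsorb n) (passIter n (d :: bc0) k near) = _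
    rw [passIter_pass_comm]
    rfl

theorem filter_length_le (l : List Int) (p q : Int → Bool) (hpq : ∀ z ∈ l, p z → q z) :
    (l.filter p).length ≤ (l.filter q).length := by
  induction l with
  | nil => simp
  | cons a t ih =>
    have h' := ih (fun z hz => hpq z (List.mem_cons_of_mem _ hz))
    by_cases hpa : p a
    · have hqa := hpq a List.mem_cons_self hpa
      simpa [List.filter_cons, hpa, hqa] using Nat.succ_le_succ h'
    · have hpaf : p a = false := Bool.eq_false_iff.mpr hpa
      by_cases hqa : q a
      · simpa [List.filter_cons, hpaf, hqa] using Nat.le_succ_of_le h'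
      · have hqaf : q a = false := Bool.eq_false_iff.mpr hqa
        simpa [List.filter_cons, hpaf, hqaf] using h'

theorem filter_length_lt (l : List Int) (p q : Int → Bool) (hpq : ∀ z ∈ l, p z → q z)
    (x : Int) (hx : x ∈ l) (hqx : q x) (hpx : ¬ p x) :
    (l.filter p).length < (l.filter q).length := by
  induction l with
  | nil => cases hx
  | cons a t ih =>
    have hpq' : ∀ z ∈ t, p z → q z := fun z hz => hpq z (List.mem_cons_of_mem _ hz)
    by_cases hpa : p a
    · have hqa : q a := hpq a List.mem_cons_self hpa
      have hxt : x ∈ t := by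
        rcases List.mem_cons.mp hx with rfl | h
        · exact absurd hpa hpx
        · exact h
      simpa [List.filter_cons, hpa, hqa] using Nat.succ_lt_succ (ih hpq' hxt)
    · have hpaf : p a = false := Bool.eq_false_iff.mpr hpa
      by_cases hqa : q a
      · simpa [List.filter_cons, hpaf, hqa] using
          Nat.lt_succ_of_le (filter_length_le t p q hpq')
      · have hqaf : q a = false := Bool.eq_false_iff.mpr hqa
        have hxt : x ∈ t := by
          rcases List.mem_cons.mp hx with rfl | h
          · exact absurd hqx hqa
          · exact h
        simpa [List.filter_cons, hpaf, hqaf] using ih hpq' hxt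

theorem pass_dichotomy (n : Int) (S0 items : List Int) (k : Nat) :
    ∀ (near : List Int),
      items.dedup.length ≤ k + (items.dedup.filter (fun x => decide (x ∈ near))).length →
      ClosedL n items (passIter n items k near) ∨ ∀ x ∈ items, x ∈ passIter n items k near := by
  induction k with
  | zero =>
    intro near hcnt
    right
    have hsub : items.dedup.filter (fun x => decide (x ∈ near)) = items.dedup := by
      have hs : List.Sublist (items.dedup.filter (fun x => decide (x ∈ near))) items.dedup :=
        List.filter_sublist
      have hlen := hs.length_le
      exact hs.eq_of_length (by omega)
    intro x hx
    have hxd : x ∈ items.dedup := List.mem_dedup.mpr hx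
    rw [← hsub] at hxd
    simpa using (List.mem_filter.mp hxd).2
  | succ k ih =>
    intro near hcnt
    by_cases hstab : ∀ x ∈ items, x ∈ items.foldl (pvAbsorb n) near → x ∈ near
    · left
      have hclosed : ClosedL n items (items.foldl (pvAbsorb n) near) := by
        intro x hx hxF y hy
        exact foldl_absorb_fires n items near x hx (hstab x hx hxF) y hy
      have hstable := passIter_stable n items _ hclosed k (items.foldl (pvAbsorb n) near)
        (fun y => Iff.rfl)
      show ClosedL n items (passIter n items k (items.foldl (pvAbsorb n) near))
      intro x hx hxm y hy
      exact (hstable y).mpr (hclosed x hx ((hstable x).mp hxm) y hy)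
    · push Not at hstab
      obtain ⟨x, hxi, hxF, hxn⟩ := hstab
      have hlt : (items.dedup.filter (fun z => decide (z ∈ near))).length
          < (items.dedup.filter (fun z => decide (z ∈ items.foldl (pvAbsorb n) near))).length := by
        refine filter_length_lt _ _ _ ?_ x (List.mem_dedup.mpr hxi) (by simpa using hxF)
          (by simpa using hxn)
        intro z hz hp
        simpa using foldl_absorb_mono n items near z (by simpa using hp)
      exact ih (items.foldl (pvAbsorb n) near) (by omega)

-- A's initial near list is exactly NbL n a
theorem init_eq (n a : Int) :
    (if a = 1 then (if a = n then [a, a + 1, a - 1] ++ [1] else [a, a + 1, a - 1]) ++ [n]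
      else (if a = n then [a, a + 1, a - 1] ++ [1] else [a, a + 1, a - 1])) = NbL n a := by
  unfold NbL
  split_ifs <;> simp_all

-- membership through B's union fold
theorem mem_foldl_union (n : Int) (l : List Int) :
    ∀ (S : PySem.Set Int) (z : Int),
      z ∈ l.foldl (fun T x => PySem.Set.union T (pvNb n x)) S ↔ z ∈ S ∨ ∃ x ∈ l, z ∈ NbL n x := by
  induction l with
  | nil => simp
  | cons a t ih =>
    intro S z
    rw [List.foldl_cons, ih]
    simp [PySem.Set.mem_union, mem_pvNb]
    tauto

-- B's worklist loop: sound, closed at exit, and only growing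
theorem pvBfs_spec (n : Int) (S0 items : List Int) (N : Nat) :
    ∀ (pending S : PySem.Set Int), pending.length ≤ N →
      (∀ z ∈ S, Cl n S0 items z) →
      (∀ x ∈ pending, x ∈ items) →
      (∀ x ∈ items, x ∉ pending → x ∈ S ∧ ∀ y ∈ NbL n x, y ∈ S) →
      (∀ z ∈ pvBfs n S pending, Cl n S0 items z) ∧
      ClosedL n items (pvBfs n S pending) ∧
      (∀ z ∈ S, z ∈ pvBfs n S pending) := by
  induction N with
  | zero =>
    intro pending S hlen h1 h2 h3
    have hp : pending = [] := List.eq_nil_of_length_eq_zero (Nat.le_zero.mp hlen)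
    subst hp
    rw [pvBfs]
    simp only [List.filter_nil, List.isEmpty_nil, dite_true]
    refine ⟨h1, ?_, fun z hz => hz⟩
    intro x hx hxS y hy
    exact (h3 x hx (List.not_mem_nil)).2 y hy
  | succ N ih =>
    intro pending S hlen h1 h2 h3
    rw [pvBfs]
    by_cases hempty : (pending.filter (fun x => PySem.Set.contains S x)).isEmpty
    · simp only [hempty, dite_true]
      refine ⟨h1, ?_, fun z hz => hz⟩
      intro x hx hxS y hy
      by_cases hxp : x ∈ pending
      · exfalso
        have : x ∈ pending.filter (fun x => PySem.Set.contains S x) :=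
          List.mem_filter.mpr ⟨hxp, (PySem.Set.contains_iff S x).mpr hxS⟩
        rw [List.isEmpty_iff.mp hempty] at this
        cases this
      · exact (h3 x hx hxp).2 y hy
    · simp only [hempty, dite_false]
      set newly := pending.filter (fun x => PySem.Set.contains S x) with hnewly
      have hmem_newly : ∀ x, x ∈ newly → x ∈ pending ∧ x ∈ S := by
        intro x hx
        have := List.mem_filter.mp hx
        exact ⟨this.1, (PySem.Set.contains_iff S x).mp this.2⟩
      have hnon : ∃ x, x ∈ newly := by
        rcases newly with _ | ⟨a, t⟩
        · simp at hempty
        · exact ⟨a, List.mem_cons_self⟩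
      set S' := newly.foldl (fun T x => PySem.Set.union T (pvNb n x)) S with hS'
      have hmemS' : ∀ z, z ∈ S' ↔ z ∈ S ∨ ∃ x ∈ newly, z ∈ NbL n x := fun z =>
        mem_foldl_union n newly S z
      have hlen' : (PySem.Set.diff pending newly).length ≤ N := by
        obtain ⟨x, hx⟩ := hnon
        have hlt : (PySem.Set.diff pending newly).length < pending.length := by
          simp only [PySem.Set.diff]
          apply List.length_filter_lt_length_iff_exists.mpr
          refine ⟨x, (hmem_newly x hx).1, ?_⟩
          simpa [List.contains_iff_mem] using hx
        omega
      have h1' : ∀ z ∈ S', Cl n S0 items z := by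
        intro z hz
        rcases (hmemS' z).mp hz with hzS | ⟨x, hx, hzNb⟩
        · exact h1 z hzS
        · have hx' := hmem_newly x hx
          exact Cl.step (h2 x hx'.1) (h1 x hx'.2) hzNb
      have h2' : ∀ x ∈ PySem.Set.diff pending newly, x ∈ items := by
        intro x hx
        exact h2 x ((PySem.Set.mem_diff pending newly x).mp hx).1
      have h3' : ∀ x ∈ items, x ∉ PySem.Set.diff pending newly →
          x ∈ S' ∧ ∀ y ∈ NbL n x, y ∈ S' := by
        intro x hx hxd
        by_cases hxp : x ∈ pending
        · have hxnew : x ∈ newly := by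
            by_contra hxn
            exact hxd ((PySem.Set.mem_diff pending newly x).mpr ⟨hxp, hxn⟩)
          refine ⟨(hmemS' x).mpr (Or.inl (hmem_newly x hxnew).2), ?_⟩
          intro y hy
          exact (hmemS' y).mpr (Or.inr ⟨x, hxnew, hy⟩)
        · obtain ⟨hxS, hxNb⟩ := h3 x hx hxp
          exact ⟨(hmemS' x).mpr (Or.inl hxS), fun y hy => (hmemS' y).mpr (Or.inl (hxNb y hy))⟩
      obtain ⟨c1, c2, c3⟩ := ih (PySem.Set.diff pending newly) S' hlen' h1' h2' h3'
      exact ⟨c1, c2, fun z hz => c3 z ((hmemS' z).mpr (Or.inl hz))⟩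

-- the two ports agree everywhere (no precondition needed at the Lean level: both total ports
-- read bc.headD [])
theorem ports_agree (n a : Int) (bc : List (List Int)) (d : Int) :
    Brackets3NeedsToBeRemoved n a bc d = Brackets3NeedsToBeRemoved_alt n a bc d := by
  unfold Brackets3NeedsToBeRemoved Brackets3NeedsToBeRemoved_alt
  simp only [init_eq, range_foldl_passIter]
  set bc0 := bc.headD [] with hbc0
  set items := d :: bc0 with hitems
  set F := passIter n items (bc0.length + 1) (NbL n a) with hF
  set pending := PySem.Set.union (PySem.Set.ofList bc0) (PySem.Set.ofList [d]) with hpending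
  set R := pvBfs n (pvNb n a) pending with hR
  -- A's set F and the closure
  have hsound : ∀ z ∈ F, Cl n (NbL n a) items z :=
    passIter_sound n (NbL n a) items (bc0.length + 1) (NbL n a) (fun z hz => Cl.base hz)
  have hdich := pass_dichotomy n (NbL n a) items (bc0.length + 1) (NbL n a) (by
    have h1 : items.dedup.length ≤ items.length := (List.dedup_sublist items).length_le
    have h2 : items.length = bc0.length + 1 := by rw [hitems, List.length_cons]
    omega)
  have hkeyF : ∀ x ∈ items, (x ∈ F ↔ Cl n (NbL n a) items x) := by
    rcases hdich with hcl | hall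
    · exact fun x hx => ⟨hsound x, fun h =>
        cl_subset n (NbL n a) items F hcl (passIter_mono n items _ (NbL n a)) x h⟩
    · exact fun x hx => ⟨hsound x, fun _ => hall x hx⟩
  -- B's set R and the closure
  have hpend : ∀ x, x ∈ pending ↔ x ∈ items := by
    intro x
    rw [hpending, hitems]
    simp [PySem.Set.mem_union, PySem.Set.mem_ofList]
    tauto
  have hbfs := pvBfs_spec n (NbL n a) items pending.length pending (pvNb n a) (Nat.le_refl _)
    (fun z hz => Cl.base ((mem_pvNb n a z).mp hz))
    (fun x hx => (hpend x).mp hx)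
    (fun x hx hxp => absurd ((hpend x).mpr hx) hxp)
  have hkeyR : ∀ x ∈ items, (x ∈ R ↔ Cl n (NbL n a) items x) := by
    intro x hx
    exact ⟨fun h => hbfs.1 x h, fun h =>
      cl_subset n (NbL n a) items R hbfs.2.1
        (fun z hz => hbfs.2.2 z ((mem_pvNb n a z).mpr hz)) x h⟩
  -- combine
  have hsame : ∀ x ∈ items, (x ∈ F ↔ x ∈ R) := fun x hx =>
    (hkeyF x hx).trans (hkeyR x hx).symm
  have hd : d ∈ F ↔ d ∈ R := hsame d (by rw [hitems]; exact List.mem_cons_self)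
  have hb : ∀ x ∈ bc0, (x ∈ F ↔ x ∈ R) := fun x hx =>
    hsame x (by rw [hitems]; exact List.mem_cons_of_mem _ hx)
  have hCiff : (d ∉ F ∨ true ∈ List.map (fun x => decide (x ∉ F)) bc0)
      ↔ ¬ (d ∈ F ∧ ∀ x ∈ bc0, x ∈ F) := by
    simp only [List.mem_map, decide_eq_true_eq]
    constructor
    · rintro (h | ⟨x, hx, hxF⟩) ⟨hdF, hall⟩
      · exact h hdF
      · exact hxF (hall x hx)
    · intro h
      by_cases hdF : d ∈ F
      · right
        have hne : ¬ ∀ x ∈ bc0, x ∈ F := fun hall => h ⟨hdF, hall⟩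
        push Not at hne
        obtain ⟨x, hx, hxF⟩ := hne
        exact ⟨x, hx, hxF⟩
      · exact Or.inl hdF
  have hc2 : ((bc0.all fun x => PySem.Set.contains R x) = true) ↔ (∀ x ∈ bc0, x ∈ R) := by
    rw [List.all_eq_true]
    exact ⟨fun h x hx => (PySem.Set.contains_iff R x).mp (h x hx),
      fun h x hx => (PySem.Set.contains_iff R x).mpr (h x hx)⟩
  have hRiff : ((!(PySem.Set.contains R d && bc0.all fun x => PySem.Set.contains R x)) = true)
      ↔ ¬ (d ∈ R ∧ ∀ x ∈ bc0, x ∈ R) := by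
    constructor
    · intro hB hcon
      rw [(PySem.Set.contains_iff R d).mpr hcon.1, hc2.mpr hcon.2] at hB
      simp at hB
    · intro hnot
      by_cases hcd : d ∈ R
      · cases h2 : (bc0.all fun x => PySem.Set.contains R x) with
        | true => exact absurd ⟨hcd, hc2.mp h2⟩ hnot
        | false => rw [(PySem.Set.contains_iff R d).mpr hcd]; rfl
      · have h1 : PySem.Set.contains R d = false := by
          cases h : PySem.Set.contains R d
          · rfl
          · exact absurd ((PySem.Set.contains_iff R d).mp h) hcd
        rw [h1]; rfl
  rw [Bool.eq_iff_iff, hRiff]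
  constructor
  · intro hA
    have hC : d ∉ F ∨ true ∈ List.map (fun x => decide (x ∉ F)) bc0 := by
      by_contra hc
      rw [if_neg hc] at hA
      cases hA
    have hnF := hCiff.mp hC
    rintro ⟨h1, h2⟩
    exact hnF ⟨hd.mpr h1, fun x hx => (hb x hx).mpr (h2 x hx)⟩
  · intro hB
    have hC := hCiff.mpr (fun hcon => hB ⟨hd.mp hcon.1, fun x hx => (hb x hx).mp (hcon.2 x hx)⟩)
    rw [if_pos hC]

-- ===== VERDICT (by name: the statement is the Claim_ definition above) =====
theorem Brackets3NeedsToBeRemoved_spec : Claim_equal_Brackets3NeedsToBeRemoved := by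
  intro n a bc d _ _
  unfold Spec_Brackets3NeedsToBeRemoved
  exact ports_agree n a bc d
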